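-- pv_equiv track=rewrite | github.com/DigiDuRe/DigiDuRe | act1/act1.py | replace_pred_count
-- ===== SOURCE A (Python) =====
-- def replace_pred_count(string):
--     count = 0
--     result = ""
--     position = string.find(" pred.")
--
--     while position != -1:
--         result += string[:position] + str(count) + " pred."
--         string = string[position + len(" pred."):]
--         count += 1
--         position = string.find(" pred.")
--
--     result += string
--
--     return result
-- ===== SOURCE B (Python) =====
-- def replace_pred_count(string):
--     out = []
--     count = 0
--     i = 0
--     n = len(string)
--     while i < n:
--         if string.startswith(" pred.", i):
--             out.append(str(count) + " pred.")
--             count += 1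
--             i += len(" pred.")
--         else:
--             out.append(string[i])
--             i += 1
--     return "".join(out)
-- ===== Notes on version B (the rewrite author's own statement) =====
-- stated objective: alternative
-- what changed: One left-to-right index scan with startswith at each position, appending pieces and joining once, instead of a repeated find/slice/concatenate loop that rebuilds the remaining string each iteration.
import Mathlib
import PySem

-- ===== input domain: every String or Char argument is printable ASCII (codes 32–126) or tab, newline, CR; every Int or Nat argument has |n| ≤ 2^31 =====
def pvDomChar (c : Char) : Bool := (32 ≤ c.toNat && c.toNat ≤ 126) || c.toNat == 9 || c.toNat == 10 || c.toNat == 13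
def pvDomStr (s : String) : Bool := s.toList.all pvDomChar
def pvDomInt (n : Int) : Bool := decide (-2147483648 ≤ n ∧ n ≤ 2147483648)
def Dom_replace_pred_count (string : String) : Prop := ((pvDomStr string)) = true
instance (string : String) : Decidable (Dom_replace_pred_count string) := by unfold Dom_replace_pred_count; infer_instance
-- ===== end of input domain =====

-- B replaces A's repeated find/slice/concatenate loop by a single left-to-right scan
-- with a startswith test at each position (objective: alternative decomposition, same result).

-- ===== PORT A =====
-- the separator " pred." as a list of code points (= " pred.".toList)
def pvSep : List Char := [' ', 'p', 'r', 'e', 'd', '.']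

theorem pvSep_length : pvSep.length = 6 := rfl

-- A's while loop: find the next " pred.", append prefix + str(count) + " pred." to result,
-- continue on the remainder.
def replacePredLoop (s : List Char) (count : Int) (result : List Char) : List Char :=
  let position := PySem.Chars.find s pvSep
  if _h : position = -1 then
    result ++ s
  else
    replacePredLoop (PySem.List.slice s (some (position + (pvSep.length : Int))) none) (count + 1)
      (result ++ PySem.List.slice s none (some position) ++ PySem.Int.toChars count ++ pvSep)
termination_by s.length
decreasing_by
  have h0 : 0 ≤ PySem.Chars.find s pvSep := by
    have := PySem.Chars.neg_one_le_find s pvSep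
    omega
  have hspec := (PySem.Chars.find_spec h0).1
  have hlen : pvSep.length ≤ (s.drop (PySem.Chars.find s pvSep).toNat).length :=
    hspec.length_le
  rw [List.length_drop] at hlen
  have hfl := PySem.Chars.find_le_length s pvSep
  rw [PySem.List.slice_from s (by rw [pvSep_length] at *; omega : (0:Int) ≤ PySem.Chars.find s pvSep + (pvSep.length : Int))]
  rw [List.length_drop]
  rw [pvSep_length] at *
  omega

def replace_pred_count (string : String) : String :=
  String.ofList (replacePredLoop string.toList 0 [])

-- ===== PORT B =====
-- B's single scan: at each position, if the rest starts with " pred." emit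
-- str(count) + " pred." and skip it, else copy one character.
def replaceAltGo (s : List Char) (count : Int) : List Char :=
  match s with
  | [] => []
  | c :: rest =>
    if pvSep.isPrefixOf (c :: rest) then
      PySem.Int.toChars count ++ pvSep ++ replaceAltGo (List.drop pvSep.length (c :: rest)) (count + 1)
    else
      c :: replaceAltGo rest count
termination_by s.length
decreasing_by
  · simp [pvSep_length]
  · simp

def replace_pred_count_alt (string : String) : String :=
  String.ofList (replaceAltGo string.toList 0)

-- ===== PRECONDITION & SPEC =====
def Spec_replace_pred_count (string : String) (out : String) : Prop := out = replace_pred_count_alt string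
instance (string : String) (out : String) : Decidable (Spec_replace_pred_count string out) := by unfold Spec_replace_pred_count; infer_instance

-- ===== CLAIM (what is proved, stated in full; the proofs are below) =====
def Claim_equal_replace_pred_count : Prop := ∀ (string : String), Dom_replace_pred_count string → Spec_replace_pred_count string (replace_pred_count string)

-- ===== LEMMAS AND PROOFS =====

-- If " pred." does not occur in s, B's scan just copies s.
theorem altGo_no_match (s : List Char) (c : Int) (h : ¬ pvSep <:+: s) :
    replaceAltGo s c = s := by
  induction s generalizing c with
  | nil => simp [replaceAltGo]
  | cons a rest ih =>
    rw [replaceAltGo]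
    have hnp : pvSep.isPrefixOf (a :: rest) = false := by
      rw [Bool.eq_false_iff]
      intro hp
      exact h (List.IsPrefix.isInfix (List.isPrefixOf_iff_prefix.mp hp))
    rw [hnp]
    simp only [Bool.false_eq_true, if_false]
    rw [ih c (fun hi => h (hi.trans (List.suffix_cons a rest).isInfix))]

-- If the first occurrence of " pred." in s is at index k, B's scan copies the first k
-- characters, emits str(c) ++ " pred.", and continues after the occurrence.
theorem altGo_match (k : Nat) (s : List Char) (c : Int)
    (hp : pvSep <+: s.drop k) (hmin : ∀ i < k, ¬ pvSep <+: s.drop i) :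
    replaceAltGo s c =
      s.take k ++ PySem.Int.toChars c ++ pvSep ++ replaceAltGo (s.drop (k + 6)) (c + 1) := by
  induction k generalizing s c with
  | zero =>
    simp only [List.drop_zero] at hp
    match s with
    | [] =>
      exact absurd (List.prefix_nil.mp hp) (by decide)
    | a :: rest =>
      rw [replaceAltGo, if_pos (List.isPrefixOf_iff_prefix.mpr hp)]
      simp [pvSep_length]
  | succ k ih =>
    match s with
    | [] =>
      exact absurd (List.prefix_nil.mp (by simpa using hp)) (by decide)
    | a :: rest =>
      have hnp : pvSep.isPrefixOf (a :: rest) = false := by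
        rw [Bool.eq_false_iff]
        intro h
        exact hmin 0 (Nat.succ_pos k) (by simpa using List.isPrefixOf_iff_prefix.mp h)
      rw [replaceAltGo, hnp]
      simp only [Bool.false_eq_true, if_false]
      have hrest := ih rest c (by simpa using hp)
        (fun i hi => by simpa using hmin (i + 1) (by omega))
      rw [hrest]
      simp only [List.take_succ_cons]
      have : k + 1 + 6 = (k + 6) + 1 := by omega
      rw [this, List.drop_succ_cons]
      simp

-- A's loop with accumulator `result` is `result ++` B's scan.
theorem loop_eq_altGo (n : Nat) (s : List Char) (count : Int) (result : List Char)
    (hn : s.length ≤ n) :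
    replacePredLoop s count result = result ++ replaceAltGo s count := by
  induction n generalizing s count result with
  | zero =>
    have hs : s = [] := List.eq_nil_of_length_eq_zero (by omega)
    subst hs
    have hf : PySem.Chars.find ([] : List Char) pvSep = -1 := by decide
    rw [replacePredLoop.eq_def]
    simp [hf, replaceAltGo]
  | succ n ih =>
    rw [replacePredLoop.eq_def]
    by_cases hfind : PySem.Chars.find s pvSep = -1
    · rw [dif_pos hfind, altGo_no_match s count ((PySem.Chars.find_eq_neg_one_iff _ _).mp hfind)]
    · rw [dif_neg hfind]
      have h0 : 0 ≤ PySem.Chars.find s pvSep := by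
        have := PySem.Chars.neg_one_le_find s pvSep
        omega
      obtain ⟨hp, hmin⟩ := PySem.Chars.find_spec h0
      have hlen : pvSep.length ≤ (s.drop (PySem.Chars.find s pvSep).toNat).length :=
        hp.length_le
      rw [List.length_drop, pvSep_length] at hlen
      have hfl := PySem.Chars.find_le_length s pvSep
      set p := PySem.Chars.find s pvSep with hpdef
      have hslice1 : PySem.List.slice s none (some p) = s.take p.toNat :=
        PySem.List.slice_to s h0
      have hslice2 : PySem.List.slice s (some (p + (pvSep.length : Int))) none
          = s.drop (p.toNat + 6) := by
        rw [PySem.List.slice_from s (by rw [pvSep_length]; omega)]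
        congr 1
        rw [pvSep_length]
        omega
      rw [hslice1, hslice2]
      rw [ih (s.drop (p.toNat + 6)) (count + 1)
        (result ++ s.take p.toNat ++ PySem.Int.toChars count ++ pvSep)
        (by rw [List.length_drop]; omega)]
      rw [altGo_match p.toNat s count hp (fun i hi => hmin i hi)]
      simp

-- ===== VERDICT (by name: the statement is the Claim_ definition above) =====
theorem replace_pred_count_spec : Claim_equal_replace_pred_count := by
  intro string _
  unfold Spec_replace_pred_count replace_pred_count replace_pred_count_alt
  rw [loop_eq_altGo string.toList.length string.toList 0 [] (le_refl _)]
  rfl
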